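-- pv_equiv track=rewrite | github.com/tsunehiko/ggdg | grammars/ludii/ludii_to_lark.py | extract_rhs
-- ===== SOURCE A (Python) =====
-- def extract_rhs(grammar: str):
--     rhs_list = []
--     current_segment = ""
--     bracket_num = 0
--     for char in grammar:
--         if char == '|':
--             if current_segment and bracket_num == 0:
--                 rhs_list.append(current_segment.strip())
--                 current_segment = ""
--             else:
--                 current_segment += char
--         elif char == '(':
--             bracket_num += 1
--             current_segment += char
--         elif char == ')':
--             bracket_num -= 1
--             current_segment += char
--         else:
--             current_segment += char
--     if current_segment:
--         rhs_list.append(current_segment.strip())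
--     return rhs_list
-- ===== SOURCE B (Python) =====
-- def extract_rhs(grammar: str):
--     # Pass 1: find the indices of the top-level pipes that actually split.
--     cuts = []
--     depth = 0
--     seg_start = 0
--     for i, c in enumerate(grammar):
--         if c == '|' and depth == 0 and seg_start < i:
--             cuts.append(i)
--             seg_start = i + 1
--         elif c == '(':
--             depth += 1
--         elif c == ')':
--             depth -= 1
--     # Pass 2: slice the original string between consecutive boundaries.
--     out = []
--     prev = 0
--     for cut in cuts:
--         out.append(grammar[prev:cut].strip())
--         prev = cut + 1
--     if prev < len(grammar):
--         out.append(grammar[prev:].strip())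
--     return out
-- ===== Notes on version B (the rewrite author's own statement) =====
-- stated objective: alternative
-- what changed: Replaced the single pass that builds each segment character-by-character in a growing string with a two-pass scheme: pass 1 only records the indices of the effective top-level pipes (depth 0 and non-empty segment since the previous split), pass 2 slices the original string between consecutive boundaries and strips each slice.
import Mathlib
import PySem

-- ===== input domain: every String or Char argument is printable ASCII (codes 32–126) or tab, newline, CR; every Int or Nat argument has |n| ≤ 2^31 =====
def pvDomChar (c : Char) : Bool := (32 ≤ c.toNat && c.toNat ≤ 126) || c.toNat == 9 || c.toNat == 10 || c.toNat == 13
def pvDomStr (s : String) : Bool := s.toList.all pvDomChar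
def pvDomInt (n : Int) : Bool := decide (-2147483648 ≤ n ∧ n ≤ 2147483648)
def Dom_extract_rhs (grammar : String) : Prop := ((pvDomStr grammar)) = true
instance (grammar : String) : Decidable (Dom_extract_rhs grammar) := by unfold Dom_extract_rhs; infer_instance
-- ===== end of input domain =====

-- B replaces A's single pass that grows each segment character-by-character with two passes:
-- collect the effective top-level pipe indices, then slice the original string between boundaries (alternative decomposition, same cost).

-- ===== PORT A =====
-- one iteration of A's for-loop; state = (rhs_list, current_segment, bracket_num)
def pvAStep (st : List String × List Char × Int) (c : Char) : List String × List Char × Int :=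
  if c = '|' then
    if st.2.1 ≠ [] ∧ st.2.2 = 0 then (st.1 ++ [String.ofList (PySem.Chars.strip st.2.1)], [], st.2.2)
    else (st.1, st.2.1 ++ [c], st.2.2)
  else if c = '(' then (st.1, st.2.1 ++ [c], st.2.2 + 1)
  else if c = ')' then (st.1, st.2.1 ++ [c], st.2.2 - 1)
  else (st.1, st.2.1 ++ [c], st.2.2)

-- the trailing 'if current_segment: rhs_list.append(current_segment.strip())'
def pvAFin (a : List String × List Char × Int) : List String :=
  if a.2.1 ≠ [] then a.1 ++ [String.ofList (PySem.Chars.strip a.2.1)] else a.1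

def extract_rhs (grammar : String) : List String :=
  pvAFin (grammar.toList.foldl pvAStep ([], [], 0))

-- ===== PORT B =====
-- pass 1: one iteration over (index, char); state = (cuts, depth, seg_start)
def pvBScan (st : List Int × Int × Int) (ic : Int × Char) : List Int × Int × Int :=
  if ic.2 = '|' ∧ st.2.1 = 0 ∧ st.2.2 < ic.1 then (st.1 ++ [ic.1], st.2.1, ic.1 + 1)
  else if ic.2 = '(' then (st.1, st.2.1 + 1, st.2.2)
  else if ic.2 = ')' then (st.1, st.2.1 - 1, st.2.2)
  else (st.1, st.2.1, st.2.2)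

-- pass 2: one iteration over the cut indices; state = (out, prev)
def pvBCut (g : List Char) (st : List String × Int) (cut : Int) : List String × Int :=
  (st.1 ++ [String.ofList (PySem.Chars.strip (PySem.List.slice g (some st.2) (some cut)))], cut + 1)

-- the trailing 'if prev < len(grammar): out.append(grammar[prev:].strip())'
def pvBFin (g : List Char) (r : List String × Int) : List String :=
  if r.2 < (g.length : Int) then
    r.1 ++ [String.ofList (PySem.Chars.strip (PySem.List.slice g (some r.2) none))]
  else r.1

def extract_rhs_alt (grammar : String) : List String :=
  let g := grammar.toList
  let p := (PySem.List.enumerate g 0).foldl pvBScan ([], 0, 0)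
  pvBFin g (p.1.foldl (pvBCut g) ([], 0))

-- ===== PRECONDITION & SPEC =====
def Spec_extract_rhs (grammar : String) (out : List String) : Prop := out = extract_rhs_alt grammar
instance (grammar : String) (out : List String) : Decidable (Spec_extract_rhs grammar out) := by unfold Spec_extract_rhs; infer_instance

-- ===== CLAIM (what is proved, stated in full; the proofs are below) =====
def Claim_equal_extract_rhs : Prop := ∀ (grammar : String), Dom_extract_rhs grammar → Spec_extract_rhs grammar (extract_rhs grammar)

-- ===== LEMMAS AND PROOFS =====

-- A's fold only appends to the rhs_list accumulator
theorem pvA_acc (l : List Char) (rhs : List String) (seg : List Char) (bn : Int) :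
    l.foldl pvAStep (rhs, seg, bn)
      = (rhs ++ (l.foldl pvAStep ([], seg, bn)).1, (l.foldl pvAStep ([], seg, bn)).2) := by
  induction l generalizing rhs seg bn with
  | nil => simp
  | cons c l ih =>
    simp only [List.foldl_cons, pvAStep]
    split_ifs with h1 h2
    · simp only [List.nil_append]
      rw [ih (rhs ++ _), ih [_]]; simp
    · exact ih ..
    · exact ih ..
    · exact ih ..
    · exact ih ..

-- pass 1 only appends to the cuts accumulator
theorem pvB_acc (l : List (Int × Char)) (cuts : List Int) (d s : Int) :
    l.foldl pvBScan (cuts, d, s)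
      = (cuts ++ (l.foldl pvBScan ([], d, s)).1, (l.foldl pvBScan ([], d, s)).2) := by
  induction l generalizing cuts d s with
  | nil => simp
  | cons c l ih =>
    simp only [List.foldl_cons, pvBScan]
    split_ifs with h1 h2 h3
    · simp only [List.nil_append]
      rw [ih (cuts ++ _), ih [_]]; simp
    · exact ih ..
    · exact ih ..
    · exact ih ..

-- pass 2 only appends to the out accumulator
theorem pvC_acc (g : List Char) (cs : List Int) (out : List String) (prev : Int) :
    cs.foldl (pvBCut g) (out, prev)
      = (out ++ (cs.foldl (pvBCut g) ([], prev)).1, (cs.foldl (pvBCut g) ([], prev)).2) := by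
  induction cs generalizing out prev with
  | nil => simp
  | cons c cs ih =>
    simp only [List.foldl_cons, pvBCut, List.nil_append]
    rw [ih (out ++ _), ih [_]]; simp

theorem pvAFin_acc (rhs : List String) (a : List String × List Char × Int) :
    pvAFin (rhs ++ a.1, a.2) = rhs ++ pvAFin a := by
  unfold pvAFin; split_ifs <;> simp

theorem pvBFin_acc (g : List Char) (out : List String) (r : List String × Int) :
    pvBFin g (out ++ r.1, r.2) = out ++ pvBFin g r := by
  unfold pvBFin; split_ifs <;> simp

-- main invariant: starting mid-string, B's remaining two-pass work equals A's remaining fold,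
-- where A's current_segment is exactly g[s:n]
theorem pvMain (rest g : List Char) (n s : Nat) (bn : Int) (hsn : s ≤ n) (hrest : g.drop n = rest) :
    pvBFin g (((PySem.List.enumerate rest (n : Int)).foldl pvBScan ([], bn, (s : Int))).1.foldl
        (pvBCut g) ([], (s : Int)))
      = pvAFin (rest.foldl pvAStep ([], (g.drop s).take (n - s), bn)) := by
  induction rest generalizing n s bn with
  | nil =>
    have hlen : g.length ≤ n := by
      have := congrArg List.length hrest; simp at this; omega
    have hdrop : (g.drop s).take (n - s) = g.drop s :=
      List.take_of_length_le (by simp; omega)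
    simp only [PySem.List.enumerate_nil, List.foldl_nil, pvBFin, pvAFin, hdrop]
    rw [PySem.List.slice_from_natCast]
    by_cases hs : s < g.length
    · rw [if_pos (by exact_mod_cast hs), if_pos (by simp [List.drop_eq_nil_iff]; omega)]
    · rw [if_neg (by exact_mod_cast hs), if_neg (by simp [List.drop_eq_nil_iff]; omega)]
  | cons c rest ih =>
    have hn : n < g.length := by
      by_contra h
      rw [List.drop_eq_nil_of_le (by omega)] at hrest; simp at hrest
    have hdropn : g.drop (n + 1) = rest := by
      have := congrArg List.tail hrest; simpa [List.tail_drop] using this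
    have hgn : g[n]'hn = c := by
      have : (g.drop n)[0]'(by simp [hrest]) = c := by simp [hrest]
      simpa using this
    have hseglen : ((g.drop s).take (n - s)).length = n - s := by
      simp; omega
    have hsegne : ((g.drop s).take (n - s) ≠ []) ↔ s < n := by
      rw [← List.length_pos_iff, hseglen]; omega
    have hsegsucc : (g.drop s).take (n - s) ++ [c] = (g.drop s).take (n + 1 - s) := by
      have h1 : n + 1 - s = (n - s) + 1 := by omega
      rw [h1, List.take_add_one]
      have : (g.drop s)[n - s]? = some c := by
        rw [List.getElem?_drop]
        have : s + (n - s) = n := by omega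
        rw [this, List.getElem?_eq_getElem hn, hgn]
      simp [this]
    rw [PySem.List.enumerate_cons]
    simp only [List.foldl_cons, pvBScan, pvAStep]
    by_cases hc : c = '|'
    · subst hc
      by_cases hcut : bn = 0 ∧ s < n
      · -- an effective top-level pipe: both sides emit g[s:n].strip()
        obtain ⟨hbn, hslt⟩ := hcut; subst hbn
        rw [if_pos (⟨rfl, rfl, by exact_mod_cast hslt⟩ :
              ('|':Char) = '|' ∧ (0:Int) = 0 ∧ (s:Int) < (n:Int))]
        rw [if_pos (rfl : ('|':Char) = '|')]
        rw [if_pos ⟨hsegne.mpr hslt, rfl⟩]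
        have hn1 : ((n : Int) + 1) = ((n + 1 : Nat) : Int) := by push_cast; ring
        rw [hn1, pvB_acc]
        simp only [List.nil_append]
        rw [List.foldl_append, List.foldl_cons, List.foldl_nil]
        simp only [pvBCut, List.nil_append]
        rw [pvC_acc, pvBFin_acc, pvA_acc, pvAFin_acc]
        have hslice : PySem.List.slice g (some (s : Int)) (some (n : Int))
            = (g.drop s).take (n - s) := by
          rw [PySem.List.slice_natCast]
        rw [hslice]
        congr 1
        have := ih (n + 1) (n + 1) 0 (le_refl _) hdropn
        simpa using this
      · -- pipe absorbed into the segment (nested or empty segment)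
        rw [if_neg (fun h => hcut ⟨h.2.1, by exact_mod_cast h.2.2⟩ :
              ¬(('|':Char) = '|' ∧ bn = 0 ∧ (s:Int) < (n:Int)))]
        rw [if_neg (by decide : ¬('|':Char) = '(')]
        rw [if_neg (by decide : ¬('|':Char) = ')')]
        rw [if_pos (rfl : ('|':Char) = '|')]
        rw [if_neg (fun h => hcut ⟨h.2, hsegne.mp h.1⟩ :
              ¬((g.drop s).take (n - s) ≠ [] ∧ bn = 0))]
        have hn1 : ((n : Int) + 1) = ((n + 1 : Nat) : Int) := by push_cast; ring
        rw [hn1, hsegsucc]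
        exact ih (n + 1) s bn (by omega) hdropn
    · rw [if_neg (fun h => hc h.1 : ¬(c = '|' ∧ bn = 0 ∧ (s:Int) < (n:Int)))]
      rw [if_neg hc]
      have hn1 : ((n : Int) + 1) = ((n + 1 : Nat) : Int) := by push_cast; ring
      by_cases ho : c = '('
      · rw [if_pos ho, if_pos ho, hn1, hsegsucc]
        exact ih (n + 1) s (bn + 1) (by omega) hdropn
      · rw [if_neg ho, if_neg ho]
        by_cases hcl : c = ')'
        · rw [if_pos hcl, if_pos hcl, hn1, hsegsucc]
          exact ih (n + 1) s (bn - 1) (by omega) hdropn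
        · rw [if_neg hcl, if_neg hcl, hn1, hsegsucc]
          exact ih (n + 1) s bn (by omega) hdropn

-- ===== VERDICT (by name: the statement is the Claim_ definition above) =====
theorem extract_rhs_spec : Claim_equal_extract_rhs := by
  intro grammar _
  unfold Spec_extract_rhs extract_rhs extract_rhs_alt
  have := pvMain grammar.toList grammar.toList 0 0 0 (le_refl _) (by simp)
  simpa using this.symm
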